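-- pv_equiv track=rewrite | github.com/tomthorogood/Mogu | cli/src/moguio/moguio/MoguEncode/algorithm.py | binary_map
-- ===== SOURCE A (Python) =====
-- def binary_map(integer_list):
--     # Make sure that every entry is an integral string
--     integer_list = [str(int(i)) for i in integer_list]
--
--     #integer_list = ['123', '45', '6']
--     #expected result = '100101'
--
--     integer = "".join(integer_list)
--     binary = 1
--     length = len(integer)
--
--     binary <<= (length-1)
--     offset  = len(integer_list[0])
--
--     for i in integer_list[1:]:
--         shift = length - 1 - offset
--         b = (1 << shift)
--         binary |= b
--         offset += len(i)
--
--     return "{0:b}".format(binary)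
-- ===== SOURCE B (Python) =====
-- def binary_map(integer_list):
--     parts = [str(int(i)) for i in integer_list]
--     chars = ['0'] * sum(len(p) for p in parts)
--     pos = 0
--     for p in parts:
--         chars[pos] = '1'
--         pos += len(p)
--     return ''.join(chars)
-- ===== Notes on version B (the rewrite author's own statement) =====
-- stated objective: faster
-- what changed: Instead of assembling a big integer with left-shifts of up to L bits per element and formatting it in binary, B fills a length-L character array with '1' at each cumulative offset and joins it.
-- crash fix: On the empty list A raises ValueError (negative shift count, 1 << -1); B returns the empty string ''. — e.g. on binary_map([]): A raises ValueError, B returns ""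
import Mathlib
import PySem

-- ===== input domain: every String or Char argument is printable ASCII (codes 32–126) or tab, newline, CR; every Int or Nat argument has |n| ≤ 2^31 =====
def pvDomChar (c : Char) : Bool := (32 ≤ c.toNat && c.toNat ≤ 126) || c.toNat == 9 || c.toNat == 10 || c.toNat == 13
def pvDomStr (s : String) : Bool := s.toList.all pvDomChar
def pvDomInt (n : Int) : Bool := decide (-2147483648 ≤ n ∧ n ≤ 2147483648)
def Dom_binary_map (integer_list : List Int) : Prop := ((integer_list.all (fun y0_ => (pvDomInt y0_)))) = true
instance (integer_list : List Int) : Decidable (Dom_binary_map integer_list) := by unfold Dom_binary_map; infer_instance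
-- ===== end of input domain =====

-- B replaces A's big-integer bit-twiddling (shift/or per element, then binary formatting)
-- with a length-L character array marked '1' at each cumulative offset: asymptotically faster.


-- ===== PORT A =====
-- literal transliteration of A; the two `.toNat` on shift amounts are exact under
-- Pre_ (nonempty list ⇒ every shift amount is ≥ 0; on [] Python raises ValueError).
def binary_map (integer_list : List Int) : String :=
  let il := integer_list.map PySem.Int.toStr
  let integer := PySem.Str.join "" il
  let length := PySem.Str.len integer
  let binary : Int := (1 : Int) <<< (length - 1).toNat
  let offset := PySem.Str.len (PySem.List.pyGetD il 0 "")
  let res := (PySem.List.slice il (some 1) none).foldl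
      (fun (st : Int × Int) i =>
        (PySem.Int.bor st.1 ((1 : Int) <<< ((length - 1 - st.2).toNat)), st.2 + PySem.Str.len i))
      (binary, offset)
  PySem.Int.toBin res.1

-- ===== PORT B =====
-- transliteration of Source B; `List.set` is exact for `chars[pos] = '1'` since every
-- part of str(int(..)) is nonempty, so pos is always in range when the loop body runs.
def binary_map_alt (integer_list : List Int) : String :=
  let parts := integer_list.map PySem.Int.toChars
  let total := (parts.map List.length).sum
  let res := parts.foldl
      (fun (st : List Char × Nat) p => (st.1.set st.2 '1', st.2 + p.length))
      (List.replicate total '0', 0)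
  String.ofList res.1

-- ===== PRECONDITION & SPEC =====
-- Pre_ excludes only the empty list, on which A raises ValueError (1 << -1).
def Pre_binary_map (integer_list : List Int) : Prop := integer_list ≠ []
instance (integer_list : List Int) : Decidable (Pre_binary_map integer_list) := by
  unfold Pre_binary_map; infer_instance
def pvWitness_binary_map : List Int := [123, 45, 6]

-- On the empty list A raises ValueError (negative shift count); B returns "".
def Raises_binary_map (integer_list : List Int) : Prop := integer_list = []
instance (integer_list : List Int) : Decidable (Raises_binary_map integer_list) := by
  unfold Raises_binary_map; infer_instance
def pvRaiseWitness_binary_map : List Int := []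
def pvRaiseWitnessOut_binary_map : String := ""

def Spec_binary_map (integer_list : List Int) (out : String) : Prop := out = binary_map_alt integer_list
instance (integer_list : List Int) (out : String) : Decidable (Spec_binary_map integer_list out) := by
  unfold Spec_binary_map; infer_instance

-- ===== CLAIM (what is proved, stated in full; the proofs are below) =====
def Claim_equal_binary_map : Prop := ∀ (integer_list : List Int), Dom_binary_map integer_list → Pre_binary_map integer_list → Spec_binary_map integer_list (binary_map integer_list)
def Claim_raises_binary_map : Prop := (∀ (integer_list : List Int), Dom_binary_map integer_list → Raises_binary_map integer_list → ¬ Pre_binary_map integer_list) ∧ (Dom_binary_map (pvRaiseWitness_binary_map) ∧ Raises_binary_map (pvRaiseWitness_binary_map) ∧ binary_map_alt (pvRaiseWitness_binary_map) = pvRaiseWitnessOut_binary_map)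

-- ===== LEMMAS AND PROOFS =====

-- value of a big-endian bit string
def pvBit (c : Char) : Nat := if c = '1' then 1 else 0
def pvNum (cs : List Char) : Nat := cs.foldl (fun a c => 2 * a + pvBit c) 0
def pvIsBits (cs : List Char) : Prop := ∀ c ∈ cs, c = '0' ∨ c = '1'

-- the marked prefix after processing a list of parts
def pvMark (pre : List Char) : List (List Char) → List Char
  | [] => pre
  | p :: ps => pvMark (pre ++ '1' :: List.replicate (p.length - 1) '0') ps

lemma pvNum_acc (cs : List Char) (a : Nat) :
    cs.foldl (fun a c => 2 * a + pvBit c) a = a * 2 ^ cs.length + pvNum cs := by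
  induction cs generalizing a with
  | nil => simp [pvNum]
  | cons c cs ih =>
    simp only [List.foldl_cons, pvNum]
    rw [ih, ih (2*0 + pvBit c), List.length_cons]
    ring

lemma pvNum_append (xs ys : List Char) :
    pvNum (xs ++ ys) = pvNum xs * 2 ^ ys.length + pvNum ys := by
  simp only [pvNum, List.foldl_append]
  rw [pvNum_acc]; rfl

lemma pvNum_one_zeros (m : Nat) : pvNum ('1' :: List.replicate m '0') = 2 ^ m := by
  have : pvNum (List.replicate m '0') = 0 := by
    induction m with
    | zero => rfl
    | succ m ih => rw [List.replicate_succ' , pvNum_append, ih]; simp [pvNum, pvBit]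
  show List.foldl _ (2*0 + pvBit '1') _ = _
  rw [pvNum_acc, this]
  simp [pvBit]

lemma pv_two_mul_or_one (x : Nat) : 2*x ||| 1 = 2*x+1 := by
  have key : Nat.bit false x ||| 1 = Nat.bit true x := by
    apply Nat.eq_of_testBit_eq
    intro k
    cases k with
    | zero => simp
    | succ k =>
      rw [Nat.testBit_lor, Nat.testBit_bit_succ, Nat.testBit_bit_succ]
      have h1 : (1 : Nat).testBit (k+1) = false := by
        have := @Nat.testBit_two_pow 0 (k+1)
        simpa using this
      simp [h1]
  simpa [Nat.bit] using key

lemma pv_lor_pow (q k : Nat) : (2 * q) * 2 ^ k ||| 2 ^ k = (2 * q) * 2 ^ k + 2 ^ k := by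
  have h : ((2*q) <<< k) ||| (1 <<< k) = ((2*q) ||| 1) <<< k := Eq.symm Nat.shiftLeft_or_distrib
  simp only [Nat.shiftLeft_eq, one_mul] at h
  rw [h, pv_two_mul_or_one]
  ring

-- fuel irrelevance for Nat.toDigitsCore, giving the top-level recursion of Nat.toDigits
lemma pvTDC (n : Nat) : ∀ (f : Nat), n < f → ∀ (ds : List Char),
    Nat.toDigitsCore 2 f n ds = Nat.toDigits 2 n ++ ds := by
  induction n using Nat.strong_induction_on with
  | _ n ih =>
    intro f hf ds
    cases f with
    | zero => omega
    | succ f =>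
      rw [Nat.toDigits, Nat.toDigitsCore, Nat.toDigitsCore]
      by_cases h : n / 2 = 0
      · simp [h]
      · simp only [h, if_false]
        have hlt : n / 2 < n := Nat.div_lt_self (by omega) (by omega)
        rw [ih (n/2) hlt f (by omega), ih (n/2) hlt n (by omega)]
        simp

lemma pvToDigits_rec (n : Nat) (h : 2 ≤ n) :
    Nat.toDigits 2 n = Nat.toDigits 2 (n / 2) ++ [(n % 2).digitChar] := by
  rw [Nat.toDigits, Nat.toDigitsCore]
  have h2 : ¬ (n / 2 = 0) := by omega
  simp only [h2, if_false]
  exact pvTDC (n/2) n (by omega) _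

-- a big-endian bit string starting with '1' is exactly the binary rendering of its value
lemma pvToDigits_num (cs : List Char) (hb : pvIsBits cs) (hh : cs.head? = some '1') :
    Nat.toDigits 2 (pvNum cs) = cs := by
  induction cs using List.reverseRecOn with
  | nil => simp at hh
  | append_singleton ys c ih =>
    cases ys with
    | nil =>
      simp at hh
      subst hh
      decide
    | cons y ys' =>
      have hh' : (y :: ys').head? = some '1' := by simpa using hh
      have hy : y = '1' := by simpa using hh'
      have hbys : pvIsBits (y :: ys') := fun d hd => hb d (List.mem_append_left _ hd)
      have hc : c = '0' ∨ c = '1' := hb c (by simp)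
      have hnum : pvNum ((y :: ys') ++ [c]) = 2 * pvNum (y :: ys') + pvBit c := by
        rw [pvNum_append]; simp [pvNum, pvBit]; ring
      have hpos : 1 ≤ pvNum (y :: ys') := by
        subst hy
        have h0 : pvNum ('1' :: ys') = (2*0 + pvBit '1') * 2 ^ ys'.length + pvNum ys' := by
          simpa [pvNum] using pvNum_acc ys' (2*0 + pvBit '1')
        have h2 : 0 < (2:Nat) ^ ys'.length := by positivity
        simp [pvBit] at h0
        omega
      have h2le : 2 ≤ pvNum ((y :: ys') ++ [c]) := by
        rw [hnum]; omega
      rw [pvToDigits_rec _ h2le, hnum]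
      have hdiv : (2 * pvNum (y :: ys') + pvBit c) / 2 = pvNum (y :: ys') := by
        rcases hc with h | h
        · simp [h, pvBit]
        · simp [h, pvBit]
          omega
      have hmod : (2 * pvNum (y :: ys') + pvBit c) % 2 = pvBit c := by
        rcases hc with h | h <;> simp [h, pvBit]
      rw [hdiv, hmod, ih hbys hh']
      rcases hc with h | h <;> simp [h, pvBit, Nat.digitChar]

lemma pvTDC_ne_nil (b : Nat) (f : Nat) : ∀ (n : Nat) (ds : List Char),
    (ds ≠ [] ∨ 0 < f) → Nat.toDigitsCore b f n ds ≠ [] := by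
  induction f with
  | zero =>
    intro n ds h
    rcases h with h | h
    · simpa [Nat.toDigitsCore] using h
    · omega
  | succ f ih =>
    intro n ds _
    rw [Nat.toDigitsCore]
    by_cases h : n / b = 0
    · simp [h]
    · simp only [h, if_false]
      exact ih (n / b) _ (Or.inl (by simp))

lemma pvToChars_ne_nil (n : Int) : PySem.Int.toChars n ≠ [] := by
  unfold PySem.Int.toChars
  split
  · simp
  · exact pvTDC_ne_nil 10 _ _ [] (Or.inr (by omega))

lemma join_nil_sep (ls : List (List Char)) : PySem.Chars.join [] ls = ls.flatten := by
  show List.intercalate [] ls = ls.flatten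
  induction ls with
  | nil => rfl
  | cons a ls ih =>
    cases ls with
    | nil => simp [List.intercalate]
    | cons b ls' =>
      simp [List.intercalate] at ih ⊢
      simpa using ih

-- the two loops, run in parallel from a common marked prefix, stay in lock-step
lemma pv_fold_par (L : Nat) (ps : List (List Char)) : ∀ (pre : List Char),
    (∀ p ∈ ps, p ≠ []) → L = pre.length + (ps.map List.length).sum →
    (ps.foldl
        (fun (st : Int × Int) p =>
          (PySem.Int.bor st.1 ((1 : Int) <<< (((L : Int) - 1 - st.2).toNat)),
            st.2 + (p.length : Int)))
        (((pvNum pre * 2 ^ (L - pre.length) : Nat) : Int), (pre.length : Int)))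
      = (((pvNum (pvMark pre ps) : Nat) : Int), ((pvMark pre ps).length : Int)) ∧
    (ps.foldl (fun (st : List Char × Nat) p => (st.1.set st.2 '1', st.2 + p.length))
        (pre ++ List.replicate (L - pre.length) '0', pre.length))
      = (pvMark pre ps, (pvMark pre ps).length) ∧
    (pvMark pre ps).length = L := by
  induction ps with
  | nil =>
    intro pre hne hL
    simp at hL
    simp [pvMark, hL]
  | cons p ps ih =>
    intro pre hne hL
    have hp : p ≠ [] := hne p (by simp)
    have hd : 1 ≤ p.length := List.length_pos_iff.mpr hp
    simp only [List.map_cons, List.sum_cons] at hL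
    set d := p.length with hdef
    set q := pvNum pre with hq
    set rem := L - pre.length with hrem
    have hremge : d + (ps.map List.length).sum = rem := by omega
    have hrem1 : 1 ≤ rem := by omega
    set pre' := pre ++ '1' :: List.replicate (d - 1) '0' with hpre'
    have hlenpre' : pre'.length = pre.length + d := by
      simp [hpre']; omega
    have hlen1 : ('1' :: List.replicate (d-1) '0').length = d := by simp; omega
    have hnum' : pvNum pre' = q * 2 ^ d + 2 ^ (d-1) := by
      rw [hpre', pvNum_append, pvNum_one_zeros, hlen1, hq]
    have hshift : (((L : Int) - 1 - (pre.length : Int)).toNat) = rem - 1 := by omega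
    have hAa : PySem.Int.bor ((pvNum pre * 2 ^ rem : Nat) : Int) ((1 : Int) <<< (((L : Int) - 1 - (pre.length:Int)).toNat))
        = ((pvNum pre' * 2 ^ (L - pre'.length) : Nat) : Int) := by
      rw [hshift]
      have h1 : (1 : Int) <<< (rem - 1) = ((1 <<< (rem-1) : Nat) : Int) := (Int.natCast_shiftLeft 1 (rem-1)).symm
      rw [h1, PySem.Int.bor_natCast]
      congr 1
      rw [Nat.shiftLeft_eq, one_mul]
      have hpow : (2:Nat) ^ rem = 2 * 2 ^ (rem - 1) := by
        rw [← pow_succ']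
        congr 1
        omega
      have hsplit : pvNum pre * 2 ^ rem = (2 * pvNum pre) * 2 ^ (rem - 1) := by
        rw [hpow]; ring
      rw [hsplit, pv_lor_pow, hnum', hlenpre']
      have h2 : L - (pre.length + d) = rem - d := by omega
      rw [h2]
      have h3 : (2:Nat) ^ (rem - 1) = 2 ^ (d - 1) * 2 ^ (rem - d) := by
        rw [← pow_add]; congr 1; omega
      have h4 : (2:Nat) ^ d = 2 * 2 ^ (d - 1) := by
        rw [← pow_succ']; congr 1; omega
      rw [h3, h4, hq]
      ring
    have hBb : (pre ++ List.replicate rem '0').set pre.length '1'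
        = pre' ++ List.replicate (L - pre'.length) '0' := by
      have h0 : List.replicate rem '0' = '0' :: List.replicate (rem - 1) '0' := by
        rw [← List.replicate_succ]
        congr 1
        omega
      rw [h0, List.set_append_right _ _ (le_refl _)]
      simp only [Nat.sub_self, List.set_cons_zero]
      rw [hpre', hlenpre']
      have h2 : L - (pre.length + d) = rem - d := by omega
      rw [h2]
      have h5 : List.replicate (rem - 1) '0' = List.replicate (d-1) '0' ++ List.replicate (rem - d) '0' := by
        rw [List.replicate_append_replicate]
        congr 1
        omega
      simp [h5]
    have ihres := ih pre' (fun r hr => hne r (by simp [hr])) (by rw [hlenpre']; omega)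
    have hinitA : ((PySem.Int.bor (((pvNum pre * 2 ^ (L - pre.length) : Nat)) : Int)
          ((1 : Int) <<< (((L : Int) - 1 - (pre.length : Int)).toNat)),
          (pre.length : Int) + (p.length : Int)) : Int × Int)
        = (((pvNum pre' * 2 ^ (L - pre'.length) : Nat) : Int), (pre'.length : Int)) := by
      rw [hAa]
      simp [hlenpre', hdef]
    have hinitB : (((pre ++ List.replicate (L - pre.length) '0').set pre.length '1',
          pre.length + p.length) : List Char × Nat)
        = (pre' ++ List.replicate (L - pre'.length) '0', pre'.length) := by
      rw [hBb, hlenpre']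
    refine ⟨?_, ?_, ?_⟩
    · simp only [List.foldl_cons]
      rw [hinitA]
      exact ihres.1
    · simp only [List.foldl_cons]
      rw [hinitB]
      exact ihres.2.1
    · exact ihres.2.2

lemma pvMark_isBits (pre : List Char) (ps : List (List Char)) (h : pvIsBits pre) :
    pvIsBits (pvMark pre ps) := by
  induction ps generalizing pre with
  | nil => exact h
  | cons p ps ih =>
    apply ih
    intro c hc
    rcases List.mem_append.mp hc with hc | hc
    · exact h c hc
    · rcases List.mem_cons.mp hc with hc | hc
      · right; exact hc
      · left; exact List.eq_of_mem_replicate hc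

lemma pvMark_head (pre : List Char) (ps : List (List Char)) (h : pre ≠ []) :
    (pvMark pre ps).head? = pre.head? := by
  induction ps generalizing pre with
  | nil => rfl
  | cons p ps ih =>
    rw [show pvMark pre (p :: ps) = pvMark (pre ++ '1' :: List.replicate (p.length - 1) '0') ps from rfl]
    rw [ih _ (by simp [h])]
    exact List.head?_append_of_ne_nil _ h

-- ===== VERDICT (by name: the statement is the Claim_ definition above) =====
theorem binary_map_spec : Claim_equal_binary_map := by
  intro l _ hpre
  unfold Pre_binary_map at hpre
  cases l with
  | nil => exact absurd rfl hpre
  | cons x xs =>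
    show binary_map (x :: xs) = binary_map_alt (x :: xs)
    set p0 := PySem.Int.toChars x with hp0
    set rest := xs.map PySem.Int.toChars with hrest
    set L : Nat := ((p0 :: rest).map List.length).sum with hLdef
    set d0 := p0.length with hd0
    have hd0ge : 1 ≤ d0 := List.length_pos_iff.mpr (pvToChars_ne_nil x)
    have hrestsum : L = d0 + (rest.map List.length).sum := by
      simp [hLdef, hd0]
    have hLge : 1 ≤ L := by omega
    have hd0le : d0 ≤ L := by omega
    set pre1 : List Char := '1' :: List.replicate (d0 - 1) '0' with hpre1
    have hpre1len : pre1.length = d0 := by simp [hpre1]; omega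
    have hpre1num : pvNum pre1 = 2 ^ (d0 - 1) := pvNum_one_zeros (d0 - 1)
    -- the parallel-fold lemma instantiated at the state after the first mark
    have hfold := pv_fold_par L rest pre1
      (fun r hr => by
        rcases List.mem_map.mp hr with ⟨i, _, hi⟩
        rw [← hi]; exact pvToChars_ne_nil i)
      (by rw [hpre1len]; omega)
    set M := pvMark pre1 rest with hM
    -- ingredients of port A
    have hjoin : (PySem.Str.join "" ((x :: xs).map PySem.Int.toStr)).toList
        = ((x :: xs).map PySem.Int.toChars).flatten := by
      simp [PySem.Str.join, join_nil_sep, List.map_map, Function.comp_def, PySem.Int.toList_toStr]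
    have hlen : PySem.Str.len (PySem.Str.join "" ((x :: xs).map PySem.Int.toStr)) = (L : Int) := by
      rw [PySem.Str.len_eq, hjoin]
      simp [hLdef, hp0, hrest, List.length_flatten, List.map_map, Function.comp_def]
    have hget : PySem.List.pyGetD ((x :: xs).map PySem.Int.toStr) 0 "" = PySem.Int.toStr x := by
      simp [PySem.List.pyGetD_zero_cons]
    have hoff : PySem.Str.len (PySem.Int.toStr x) = (d0 : Int) := by
      rw [PySem.Str.len_eq, PySem.Int.toList_toStr]
    have htail : PySem.List.slice ((x :: xs).map PySem.Int.toStr) (some 1) none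
        = xs.map PySem.Int.toStr := by
      rw [PySem.List.slice_from_one]
      rfl
    have hbin0 : (1 : Int) <<< (((L : Int) - 1).toNat)
        = ((pvNum pre1 * 2 ^ (L - pre1.length) : Nat) : Int) := by
      rw [show ((L : Int) - 1).toNat = L - 1 by omega]
      rw [show (1 : Int) <<< (L-1) = ((1 <<< (L-1) : Nat) : Int) by
        rw [Int.natCast_shiftLeft]; norm_num]
      congr 1
      rw [Nat.shiftLeft_eq, one_mul, hpre1num, hpre1len, ← pow_add]
      congr 1
      omega
    -- port A computes the binary rendering of pvNum M
    have hA : binary_map (x :: xs) = PySem.Int.toBin ((pvNum M : Nat) : Int) := by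
      unfold binary_map
      simp only [htail, hget, hlen, hoff, hbin0]
      rw [List.foldl_map]
      have hfun : (fun (st : Int × Int) (i : Int) =>
            (PySem.Int.bor st.1 ((1 : Int) <<< (((L : Int) - 1 - st.2).toNat)),
              st.2 + PySem.Str.len (PySem.Int.toStr i)))
          = (fun (st : Int × Int) (i : Int) =>
            (PySem.Int.bor st.1 ((1 : Int) <<< (((L : Int) - 1 - st.2).toNat)),
              st.2 + ((PySem.Int.toChars i).length : Int))) := by
        funext st i
        rw [PySem.Str.len_eq, PySem.Int.toList_toStr]
      rw [hfun]
      have h1 := hfold.1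
      rw [hrest] at h1
      simp only [List.foldl_map] at h1
      rw [show ((d0 : Nat) : Int) = (pre1.length : Int) from by rw [hpre1len]]
      rw [h1]
    -- port B computes M itself
    have hB : binary_map_alt (x :: xs) = String.ofList M := by
      unfold binary_map_alt
      simp only [List.map_cons, ← hp0, ← hrest, List.foldl_cons]
      rw [show (p0.length :: List.map List.length rest).sum = L from by simp [hLdef]]
      have hstep : (((List.replicate L '0').set 0 '1', 0 + p0.length) : List Char × Nat)
          = (pre1 ++ List.replicate (L - pre1.length) '0', pre1.length) := by
        have h0 : List.replicate L '0' = '0' :: List.replicate (L - 1) '0' := by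
          rw [← List.replicate_succ]
          congr 1
          omega
        have h1 : List.replicate (L-1) '0' = List.replicate (d0-1) '0' ++ List.replicate (L - d0) '0' := by
          rw [List.replicate_append_replicate]
          congr 1
          omega
        rw [h0, List.set_cons_zero, hpre1len, h1, hpre1]
        simp [hd0]
      rw [hstep, hfold.2.1]
    -- conclude: M is a bit string headed by '1'
    rw [hA, hB]
    unfold PySem.Int.toBin
    congr 1
    unfold PySem.Int.toBinChars
    rw [if_neg (not_lt.mpr (Int.natCast_nonneg _)), Int.toNat_natCast]
    apply pvToDigits_num
    · exact pvMark_isBits pre1 rest (by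
        intro c hc
        rcases List.mem_cons.mp hc with hc | hc
        · right; exact hc
        · left; exact List.eq_of_mem_replicate hc)
    · rw [hM, pvMark_head pre1 rest (by simp [hpre1])]
      simp [hpre1]

theorem binary_map_raises : Claim_raises_binary_map := by
  unfold Claim_raises_binary_map
  exact ⟨fun l _ h => by simp [Raises_binary_map] at h; simp [h, Pre_binary_map], by decide⟩

-- self-check: the raise region really lies outside Pre_ at the witness
lemma pv_raise_witness_ok : ¬ Pre_binary_map pvRaiseWitness_binary_map :=
  binary_map_raises.1 pvRaiseWitness_binary_map (by decide) (by decide)
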